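-- pv_equiv track=rewrite | github.com/miguel-mxrxrx04/MORERA_BAKALI_GRUPO_01 | core.py | token_based_post_summarisation
-- ===== SOURCE A (Python) =====
-- def token_based_post_summarisation(tokens: str) -> str:
--     """
--     Genera un resumen usando el 25% de los tokens más relevantes.
--
--     Args:
--         tokens (str): String de tokens preprocesados separados por espacios
--
--     Returns:
--         str: Resumen con los tokens más frecuentes
--     """
--     # Convertir string de tokens a lista
--     token_list = tokens.split()
--
--     # Calcular frecuencias
--     word_frequencies = {}
--     for token in token_list:
--         word_frequencies[token] = word_frequencies.get(token, 0) + 1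
--
--     # Ordenar tokens por frecuencia
--     sorted_tokens = sorted(word_frequencies.items(),
--                          key=lambda x: x[1],
--                          reverse=True)
--
--     # Seleccionar el 50% de los tokens más frecuentes
--     num_tokens = max(1, len(token_list) // 2)
--     selected_tokens = [token for token, _ in sorted_tokens[:num_tokens]]
--
--     return " ".join(selected_tokens)
-- ===== SOURCE B (Python) =====
-- def token_based_post_summarisation(tokens: str) -> str:
--     token_list = tokens.split()
--     freq = {}
--     for t in token_list:
--         freq[t] = freq.get(t, 0) + 1
--     if not freq:
--         return ""
--     maxf = max(freq.values())
--     buckets = {}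
--     for t, f in freq.items():
--         buckets.setdefault(f, []).append(t)
--     ordered = []
--     for f in range(maxf, 0, -1):
--         ordered.extend(buckets.get(f, []))
--     return " ".join(ordered[:max(1, len(token_list) // 2)])
-- ===== Notes on version B (the rewrite author's own statement) =====
-- stated objective: alternative
-- what changed: Replaces A's comparison sort of the frequency table (sorted by count, reverse, stable) with a counting/bucket pass: tokens are appended to per-frequency buckets in dict insertion order and emitted from the highest frequency down, which reproduces the stable reverse sort exactly.
import Mathlib
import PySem

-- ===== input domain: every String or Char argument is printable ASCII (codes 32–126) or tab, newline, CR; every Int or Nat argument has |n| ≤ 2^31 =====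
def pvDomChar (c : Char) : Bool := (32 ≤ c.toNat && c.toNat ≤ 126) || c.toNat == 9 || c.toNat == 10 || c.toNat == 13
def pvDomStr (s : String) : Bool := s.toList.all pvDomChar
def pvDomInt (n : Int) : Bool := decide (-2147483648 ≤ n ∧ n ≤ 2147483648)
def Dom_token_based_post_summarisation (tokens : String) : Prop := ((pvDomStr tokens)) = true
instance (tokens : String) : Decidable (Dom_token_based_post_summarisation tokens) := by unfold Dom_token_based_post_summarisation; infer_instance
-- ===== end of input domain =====

-- B replaces A's comparison sort of the frequency table by a counting/bucket pass over the
-- frequencies (buckets filled in dict insertion order, emitted from the highest frequency down);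
-- objective: alternative (same result, different algorithm).

-- ===== PORT A =====
def token_based_post_summarisation (tokens : String) : String :=
  let token_list := PySem.Str.split₀ tokens
  let word_frequencies := token_list.foldl
    (fun d token => d.insert token (d.getD token 0 + 1))
    (PySem.Dict.empty : PySem.Dict String Int)
  let sorted_tokens := PySem.List.sorted word_frequencies.items (fun x => x.2) true
  let num_tokens : Int := max 1 (PySem.Int.floordiv (token_list.length : Int) 2)
  let selected_tokens := (PySem.List.slice sorted_tokens none (some num_tokens)).map (fun p => p.1)
  PySem.Str.join " " selected_tokens

-- ===== PORT B =====
-- Python's `if not freq: return ""` guard followed by `max(freq.values())` is ported as one match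
-- on max?: the dict is empty exactly when max? of its values is none.
def token_based_post_summarisation_alt (tokens : String) : String :=
  let token_list := PySem.Str.split₀ tokens
  let freq := token_list.foldl
    (fun d t => d.insert t (d.getD t 0 + 1))
    (PySem.Dict.empty : PySem.Dict String Int)
  match PySem.List.max? freq.values (fun v => v) with
  | none => ""
  | some maxf =>
    let buckets := freq.items.foldl
      (fun (b : PySem.Dict Int (List String)) p => b.modify p.2 [] (fun l => l ++ [p.1]))
      PySem.Dict.empty
    let ordered := (PySem.List.pyRange maxf 0 (-1)).foldl (fun acc f => acc ++ buckets.getD f []) []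
    PySem.Str.join " "
      (PySem.List.slice ordered none (some (max 1 (PySem.Int.floordiv (token_list.length : Int) 2))))

-- ===== PRECONDITION & SPEC =====
def Spec_token_based_post_summarisation (tokens : String) (out : String) : Prop := out = token_based_post_summarisation_alt tokens
instance (tokens : String) (out : String) : Decidable (Spec_token_based_post_summarisation tokens out) := by unfold Spec_token_based_post_summarisation; infer_instance

-- ===== CLAIM (what is proved, stated in full; the proofs are below) =====
def Claim_equal_token_based_post_summarisation : Prop := ∀ (tokens : String), Dom_token_based_post_summarisation tokens → Spec_token_based_post_summarisation tokens (token_based_post_summarisation tokens)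

-- ===== LEMMAS AND PROOFS =====

lemma insertBy_append_of_not {α : Type} (b : α → α → Bool) (x : α) (ys zs : List α)
    (h : ∀ y ∈ ys, b x y = false) :
    PySem.List.insertBy b x (ys ++ zs) = ys ++ PySem.List.insertBy b x zs := by
  induction ys with
  | nil => simp
  | cons y t ih =>
    simp only [List.cons_append, PySem.List.insertBy]
    rw [h y (by simp)]
    simp only [Bool.false_eq_true, if_false]
    rw [ih (fun a ha => h a (by simp [ha]))]

lemma insertBy_front {α : Type} (b : α → α → Bool) (x : α) (zs : List α)
    (h : ∀ z ∈ zs, b x z = true) :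
    PySem.List.insertBy b x zs = x :: zs := by
  cases zs with
  | nil => simp [PySem.List.insertBy]
  | cons z t => simp [PySem.List.insertBy, h z (by simp)]

-- Inserting one element into the bucket concatenation lands it at the back of its own bucket.
lemma bkt_step {α : Type} (key : α → Int) (vs : List Int) (xs : List α) (x : α)
    (hvs : vs.Pairwise (· > ·)) (hx : key x ∈ vs) :
    PySem.List.insertBy (fun a b => decide (key b < key a)) x
      (vs.flatMap (fun v => xs.filter (fun y => key y == v)))
    = vs.flatMap (fun v => (xs ++ [x]).filter (fun y => key y == v)) := by
  induction vs with
  | nil => cases hx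
  | cons v vs' ih =>
    have hlt : ∀ w ∈ vs', w < v := fun w hw => (List.pairwise_cons.mp hvs).1 w hw
    simp only [List.flatMap_cons]
    by_cases hkv : key x = v
    · rw [insertBy_append_of_not _ _ _ _ (by
        intro y hy
        simp only [List.mem_filter, beq_iff_eq] at hy
        simp [hy.2, hkv])]
      rw [insertBy_front _ _ _ (by
        intro z hz
        simp only [List.mem_flatMap, List.mem_filter, beq_iff_eq] at hz
        obtain ⟨w, hw, _, hzw⟩ := hz
        simp [hzw, hkv, hlt w hw])]
      have h1 : (xs ++ [x]).filter (fun y => key y == v) = xs.filter (fun y => key y == v) ++ [x] := by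
        simp [List.filter_append, hkv]
      have h2 : ∀ w ∈ vs', (xs ++ [x]).filter (fun y => key y == w) = xs.filter (fun y => key y == w) := by
        intro w hw
        have : key x ≠ w := by have := hlt w hw; omega
        simp [List.filter_append, this]
      rw [h1, List.flatMap_congr h2]
      simp
    · have hx' : key x ∈ vs' := by cases hx with | head => exact absurd rfl hkv | tail _ h => exact h
      have hxlt : key x < v := hlt _ hx'
      rw [insertBy_append_of_not _ _ _ _ (by
        intro y hy
        simp only [List.mem_filter, beq_iff_eq] at hy
        simp [hy.2]; omega)]
      rw [ih (List.pairwise_cons.mp hvs).2 hx']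
      have : (xs ++ [x]).filter (fun y => key y == v) = xs.filter (fun y => key y == v) := by
        simp [List.filter_append, hkv]
      rw [this]

-- A stable reverse sort by an Int key is the concatenation of the key buckets, taken in strictly
-- decreasing key order, each bucket in first-appearance order.
lemma sorted_rev_eq_bkt {α : Type} (key : α → Int) (vs : List Int) (xs : List α)
    (hvs : vs.Pairwise (· > ·)) (hmem : ∀ x ∈ xs, key x ∈ vs) :
    PySem.List.sorted xs key true = vs.flatMap (fun v => xs.filter (fun y => key y == v)) := by
  rw [PySem.List.sorted_rev_eq_foldl_insertBy]
  induction xs using List.reverseRecOn with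
  | nil => simp
  | append_singleton t x ih =>
    rw [List.foldl_append]
    simp only [List.foldl_cons, List.foldl_nil]
    rw [ih (fun a ha => hmem a (by simp [ha]))]
    exact bkt_step key vs t x hvs (hmem x (by simp))

lemma pyRange_down_eq (m : Int) :
    PySem.List.pyRange m 0 (-1) = (List.range m.toNat).map (fun k : Nat => m - (k : Int)) := by
  simp only [PySem.List.pyRange]
  have h1 : (-1 : Int) ≠ 0 := by norm_num
  rw [if_neg h1]
  have h2 : ¬ (0 : Int) < -1 := by norm_num
  rw [if_neg h2]
  by_cases hm : (0:Int) < m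
  · rw [if_pos hm]
    have : ((m - 0 + -(-1) - 1) / -(-1)).toNat = m.toNat := by norm_num
    rw [this]
    exact List.map_congr_left (by intro k _; ring)
  · rw [if_neg hm]
    have : m.toNat = 0 := by omega
    simp [this]

lemma mem_pyRange_down (m v : Int) : v ∈ PySem.List.pyRange m 0 (-1) ↔ 0 < v ∧ v ≤ m := by
  rw [pyRange_down_eq]
  constructor
  · intro h
    obtain ⟨k, hk, rfl⟩ := List.mem_map.mp h
    have := List.mem_range.mp hk
    omega
  · intro ⟨hh1, hh2⟩
    exact List.mem_map.mpr ⟨(m - v).toNat, List.mem_range.mpr (by omega), by omega⟩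

lemma pairwise_gt_pyRange_down (m : Int) : (PySem.List.pyRange m 0 (-1)).Pairwise (· > ·) := by
  rw [pyRange_down_eq]
  apply List.Pairwise.map (fun k : Nat => m - (k : Int)) (R := (· < ·))
  · intro a b h; simp only [gt_iff_lt]; omega
  · exact List.pairwise_lt_range

-- ===== VERDICT (by name: the statement is the Claim_ definition above) =====
theorem token_based_post_summarisation_spec : Claim_equal_token_based_post_summarisation := by
  intro tokens _
  unfold Spec_token_based_post_summarisation
  unfold token_based_post_summarisation token_based_post_summarisation_alt
  dsimp only
  rw [PySem.Dict.foldl_insert_getD_add_one_eq_counter]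
  set tl := PySem.Str.split₀ tokens with htl
  set c := PySem.Dict.counter tl with hc
  have hn : (0:Int) ≤ max 1 (PySem.Int.floordiv (tl.length : Int) 2) :=
    le_trans (by norm_num) (le_max_left _ _)
  cases hmax : PySem.List.max? c.values (fun v => v) with
  | none =>
    have hv : c.values = [] := (PySem.List.max?_eq_none_iff _ _).mp hmax
    have hitems : c.items = [] := by
      have : c.items.map (fun p => p.2) = [] := hv
      exact List.map_eq_nil_iff.mp this
    rw [hitems, (PySem.List.sorted_eq_nil_iff _ _ _).mpr rfl, PySem.List.slice_to _ hn]
    simp only [List.take_nil, List.map_nil]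
    rfl
  | some maxf =>
    -- every frequency in the counter lies in (0, maxf]
    have hmem : ∀ p ∈ c.items, (p.2 : Int) ∈ PySem.List.pyRange maxf 0 (-1) := by
      intro p hp
      rw [mem_pyRange_down]
      constructor
      · rw [hc, PySem.Dict.items_counter] at hp
        obtain ⟨k, hk, rfl⟩ := List.mem_map.mp hp
        have : k ∈ tl := (PySem.Set.mem_ofList _ _).mp hk
        have := List.count_pos_iff.mpr this
        simp
        omega
      · exact PySem.List.max?_isMax hmax p.2 (List.mem_map_of_mem hp)
    -- A's sorted list is the bucket concatenation
    rw [sorted_rev_eq_bkt (fun p : String × Int => p.2) _ _ (pairwise_gt_pyRange_down maxf) hmem]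
    -- B's buckets dict
    have hbkts : ∀ f : Int,
        (c.items.foldl (fun b p => b.modify p.2 [] (fun l => l ++ [p.1]))
          (PySem.Dict.empty : PySem.Dict Int (List String))).getD f []
        = ((c.items.filter (fun p => p.2 == f)).map (fun p => p.1)) := by
      intro f
      have hswap : c.items.foldl (fun b p => b.modify p.2 [] (fun l => l ++ [p.1]))
          (PySem.Dict.empty : PySem.Dict Int (List String))
          = (c.items.map (fun p => (p.2, p.1))).foldl
              (fun b p => b.modify p.1 [] (fun l => l ++ [p.2])) PySem.Dict.empty := by
        rw [List.foldl_map]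
      rw [hswap, PySem.Dict.getD_foldl_modify_append]
      simp [List.filter_map, Function.comp_def]
    simp only [hbkts]
    rw [PySem.List.foldl_append_eq_flatMap]
    simp only [List.nil_append]
    -- slices are takes; map commutes with take and flatMap
    rw [PySem.List.slice_to _ hn, PySem.List.slice_to _ hn, List.map_take]
    congr 1
    rw [List.map_flatMap]
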